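-- pv_equiv track=rewrite | github.com/Fy5tew/OIB-2-1 | lab04.1/ciphers_python/playfer_cipher.py | _get_digrams
-- ===== SOURCE A (Python) =====
-- def _get_digrams(message: str, delimeter: str, alphabet: str) -> str:
--     digram_letters = 0
--     last_letter = ''
--     digrams = ""
--     for ch in message.upper():
--         if ch not in alphabet.upper():
--             continue
--         if digram_letters >= 2:
--             digrams += ' '
--             digram_letters = 0
--         if digram_letters == 1 and ch == last_letter:
--             digrams += delimeter + ' '
--             digram_letters = 0
--         digrams += ch
--         last_letter = ch
--         digram_letters += 1
--     if digram_letters == 1: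
--         digrams += delimeter
--     return digrams
-- ===== SOURCE B (Python) =====
-- def _get_digrams(message: str, delimeter: str, alphabet: str) -> str:
--     alpha = alphabet.upper()
--     letters = [ch for ch in message.upper() if ch in alpha]
--     tokens = []
--     i = 0
--     while i < len(letters):
--         if i + 1 == len(letters) or letters[i] == letters[i + 1]:
--             tokens.append(letters[i] + delimeter)
--             i += 1
--         else:
--             tokens.append(letters[i] + letters[i + 1])
--             i += 2
--     return ' '.join(tokens)
-- ===== Notes on version B (the rewrite author's own statement) =====
-- stated objective: simpler
-- what changed: Replaces A's char-by-char state machine (digram_letters counter, last_letter, string accumulation with retroactive space/delimiter insertion) by a two-phase filter-then-chunk: first collect the valid letters, then walk them with a 1-or-2 step lookahead producing a list of digram tokens joined with ' '.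
import Mathlib
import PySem

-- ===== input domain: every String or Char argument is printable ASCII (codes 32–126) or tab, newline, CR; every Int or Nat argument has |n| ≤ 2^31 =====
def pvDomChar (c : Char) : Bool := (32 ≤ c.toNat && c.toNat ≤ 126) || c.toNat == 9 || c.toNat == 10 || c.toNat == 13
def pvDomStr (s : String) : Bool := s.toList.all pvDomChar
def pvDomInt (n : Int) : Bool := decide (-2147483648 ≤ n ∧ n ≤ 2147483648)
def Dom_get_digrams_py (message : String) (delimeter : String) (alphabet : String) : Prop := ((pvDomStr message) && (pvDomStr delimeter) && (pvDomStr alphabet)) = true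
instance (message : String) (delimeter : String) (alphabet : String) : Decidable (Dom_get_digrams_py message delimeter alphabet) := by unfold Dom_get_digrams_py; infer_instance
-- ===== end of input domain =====

-- B replaces A's char-by-char state machine by a filter-then-lookahead-chunk pass; objective: simpler.

-- ===== PORT A =====
-- loop body of A: state = (digram_letters, last_letter, digrams); 'ch not in alphabet' on a
-- single char is Python substring membership, ported exactly as Chars.isIn [ch] alpha.
def pvAStep (alphaU : List Char) (d : List Char)
    (s : Int × List Char × List Char) (ch : Char) : Int × List Char × List Char :=
  if ¬ (PySem.Chars.isIn [ch] alphaU = true) then s  -- continue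
  else
    let s1 := if s.1 ≥ 2 then ((0 : Int), s.2.1, s.2.2 ++ [' ']) else s
    let s2 := if s1.1 == 1 && [ch] == s1.2.1 then ((0 : Int), s1.2.1, s1.2.2 ++ d ++ [' ']) else s1
    (s2.1 + 1, [ch], s2.2.2 ++ [ch])

def get_digrams_py (message : String) (delimeter : String) (alphabet : String) : String :=
  let final := (PySem.Chars.upper message.toList).foldl
      (pvAStep (PySem.Chars.upper alphabet.toList) delimeter.toList) ((0 : Int), [], [])
  String.mk (if final.1 == 1 then final.2.2 ++ delimeter.toList else final.2.2)

-- ===== PORT B =====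
-- B's while loop over the letter list with step 1 or 2 → structural recursion consuming 1 or 2.
def pvBChunks (d : List Char) : List Char → List (List Char)
  | [] => []
  | [a] => [[a] ++ d]
  | a :: b :: rest =>
      if a == b then ([a] ++ d) :: pvBChunks d (b :: rest)
      else [a, b] :: pvBChunks d rest

def get_digrams_py_alt (message : String) (delimeter : String) (alphabet : String) : String :=
  let alphaU := PySem.Chars.upper alphabet.toList
  let letters := (PySem.Chars.upper message.toList).filter
      (fun ch => PySem.Chars.isIn [ch] alphaU)
  String.mk (List.intercalate [' '] (pvBChunks delimeter.toList letters))

-- ===== PRECONDITION & SPEC =====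
def Spec_get_digrams_py (message : String) (delimeter : String) (alphabet : String) (out : String) : Prop := out = get_digrams_py_alt message delimeter alphabet
instance (message : String) (delimeter : String) (alphabet : String) (out : String) : Decidable (Spec_get_digrams_py message delimeter alphabet out) := by unfold Spec_get_digrams_py; infer_instance

-- ===== CLAIM (what is proved, stated in full; the proofs are below) =====
def Claim_equal_get_digrams_py : Prop := ∀ (message : String) (delimeter : String) (alphabet : String), Dom_get_digrams_py message delimeter alphabet → Spec_get_digrams_py message delimeter alphabet (get_digrams_py message delimeter alphabet)

-- ===== LEMMAS AND PROOFS =====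

-- the unguarded step (the body after the 'continue' filter)
def pvACore (d : List Char) (s : Int × List Char × List Char) (ch : Char) : Int × List Char × List Char :=
  let s1 := if s.1 ≥ 2 then ((0 : Int), s.2.1, s.2.2 ++ [' ']) else s
  let s2 := if s1.1 == 1 && [ch] == s1.2.1 then ((0 : Int), s1.2.1, s1.2.2 ++ d ++ [' ']) else s1
  (s2.1 + 1, [ch], s2.2.2 ++ [ch])

lemma pvAStep_eq (alphaU d : List Char) (s : Int × List Char × List Char) (ch : Char) :
    pvAStep alphaU d s ch =
      if PySem.Chars.isIn [ch] alphaU then pvACore d s ch else s := by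
  simp only [pvAStep, pvACore]
  by_cases h : PySem.Chars.isIn [ch] alphaU = true <;> simp [h]

-- A's guarded fold over all chars = unguarded fold over the filtered letters
lemma pvFold_filter (alphaU d : List Char) :
    ∀ (xs : List Char) (s : Int × List Char × List Char),
      xs.foldl (pvAStep alphaU d) s =
      (xs.filter (fun ch => PySem.Chars.isIn [ch] alphaU)).foldl (pvACore d) s := by
  intro xs
  induction xs with
  | nil => intro s; rfl
  | cons c cs ih =>
      intro s
      by_cases h : PySem.Chars.isIn [c] alphaU = true <;>
        simp [List.foldl_cons, h, pvAStep_eq, ih]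

-- the finishing step of A applied to a fold state
def pvFinish (d : List Char) (s : Int × List Char × List Char) : List Char :=
  if s.1 == 1 then s.2.2 ++ d else s.2.2

lemma pvBChunks_ne_nil (d : List Char) (a : Char) (xs : List Char) :
    pvBChunks d (a :: xs) ≠ [] := by
  cases xs with
  | nil => simp [pvBChunks]
  | cons b rest => by_cases h : a == b <;> simp [pvBChunks, h]

lemma pvIntercalate_cons_ne (t : List Char) (ts : List (List Char)) (h : ts ≠ []) :
    List.intercalate [' '] (t :: ts) = t ++ [' '] ++ List.intercalate [' '] ts := by
  cases ts with
  | nil => exact absurd rfl h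
  | cons u us =>
      simp [List.intercalate, List.intersperse]

-- MAIN INVARIANT: running A's core loop from a fresh-digram state (0, l0, out) and finishing
-- yields out ++ the joined chunk tokens of B.
lemma pvMain (d : List Char) :
    ∀ (ls : List Char) (l0 out : List Char),
      pvFinish d (ls.foldl (pvACore d) ((0 : Int), l0, out)) =
        out ++ List.intercalate [' '] (pvBChunks d ls) := by
  intro ls
  induction ls using pvBChunks.induct with
  | case1 =>
      intro l0 out; simp [pvFinish, pvBChunks, List.intercalate]
  | case2 a =>
      intro l0 out
      simp [pvBChunks, List.intercalate, List.foldl, pvACore, pvFinish]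
  | case3 a b rest hab ih =>
      intro l0 out
      have hba : b = a := (beq_iff_eq.mp hab).symm
      rw [show (a :: b :: rest).foldl (pvACore d) ((0 : Int), l0, out)
            = (b :: rest).foldl (pvACore d) ((0 : Int), [a], out ++ [a] ++ d ++ [' ']) by
        simp only [List.foldl_cons]
        congr 1
        rw [show pvACore d ((0 : Int), l0, out) a = ((1 : Int), [a], out ++ [a]) by
          simp [pvACore]]
        simp [pvACore, hba]]
      have hch : pvBChunks d (a :: b :: rest) = ([a] ++ d) :: pvBChunks d (b :: rest) := by
        simp [pvBChunks, hab]
      cases rest with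
      | nil =>
          simp [pvBChunks, pvACore, pvFinish, List.foldl, List.intercalate, hba]
      | cons c rs =>
          have h1 : pvACore d ((0 : Int), [a], out ++ [a] ++ d ++ [' ']) b
              = ((1 : Int), [b], out ++ [a] ++ d ++ [' '] ++ [b]) := by
            simp [pvACore]
          rw [show (b :: c :: rs).foldl (pvACore d) ((0 : Int), [a], out ++ [a] ++ d ++ [' '])
                = (c :: rs).foldl (pvACore d)
                    (pvACore d ((0 : Int), [a], out ++ [a] ++ d ++ [' ']) b) from rfl,
            h1,
            show (c :: rs).foldl (pvACore d) ((1 : Int), [b], out ++ [a] ++ d ++ [' '] ++ [b])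
              = (b :: c :: rs).foldl (pvACore d) ((0 : Int), [a], out ++ [a] ++ d ++ [' ']) by
              simp only [List.foldl_cons]; rw [h1]]
          rw [ih, hch, pvIntercalate_cons_ne _ _ (pvBChunks_ne_nil d b (c :: rs))]
          simp
  | case4 a b rest hab ih =>
      intro l0 out
      have hba : ¬ b = a := fun h => hab (by simp [h])
      have h2 : (a :: b :: rest).foldl (pvACore d) ((0 : Int), l0, out)
          = rest.foldl (pvACore d) ((2 : Int), [b], out ++ [a] ++ [b]) := by
        simp only [List.foldl_cons]
        congr 1
        rw [show pvACore d ((0 : Int), l0, out) a = ((1 : Int), [a], out ++ [a]) by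
          simp [pvACore]]
        simp [pvACore, hba]
      rw [h2]
      have hch : pvBChunks d (a :: b :: rest) = [a, b] :: pvBChunks d rest := by
        simp [pvBChunks, hab]
      cases rest with
      | nil =>
          have hab' : ¬ a = b := fun h => hba h.symm
          simp [pvBChunks, pvFinish, List.foldl, List.intercalate, hab']
      | cons c rs =>
          have h3 : pvACore d ((2 : Int), [b], out ++ [a] ++ [b]) c
              = ((1 : Int), [c], out ++ [a] ++ [b] ++ [' '] ++ [c]) := by
            simp [pvACore]
          rw [show (c :: rs).foldl (pvACore d) ((2 : Int), [b], out ++ [a] ++ [b])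
                = rs.foldl (pvACore d) (pvACore d ((2 : Int), [b], out ++ [a] ++ [b]) c) from rfl,
            h3,
            show rs.foldl (pvACore d) ((1 : Int), [c], out ++ [a] ++ [b] ++ [' '] ++ [c])
              = (c :: rs).foldl (pvACore d) ((0 : Int), [], out ++ [a] ++ [b] ++ [' ']) by
              simp only [List.foldl_cons]
              rw [show pvACore d ((0 : Int), ([] : List Char), out ++ [a] ++ [b] ++ [' ']) c
                   = ((1 : Int), [c], out ++ [a] ++ [b] ++ [' '] ++ [c]) by simp [pvACore]]]
          rw [ih, hch, pvIntercalate_cons_ne _ _ (pvBChunks_ne_nil d c rs)]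
          simp

-- ===== VERDICT (by name: the statement is the Claim_ definition above) =====
theorem get_digrams_py_spec : Claim_equal_get_digrams_py := by
  intro message delimeter alphabet _
  show get_digrams_py message delimeter alphabet = get_digrams_py_alt message delimeter alphabet
  unfold get_digrams_py get_digrams_py_alt
  rw [pvFold_filter]
  exact congrArg String.mk
    (pvMain delimeter.toList _ [] [])
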